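-- pv_equiv track=rewrite | github.com/Genesis2010/codetree-TILs | 241012/포탑 부수기/destroy-the-turret.py | max_row_col_tower
-- ===== SOURCE A (Python) =====
-- def max_row_col_tower(lastest_towers):
--     max_tower = 0
--     temp = []
--
--     for i in range(len(lastest_towers)):
--         r, c = lastest_towers[i]
--
--         if max_tower < r + c:
--             max_tower = r + c
--             temp = [(r, c)]
--         elif max_tower == r + c:
--             temp.append((r, c))
--
--     return temp
-- ===== SOURCE B (Python) =====
-- def max_row_col_tower(lastest_towers):
--     m = max([r + c for r, c in lastest_towers] + [0])
--     return [(r, c) for (r, c) in lastest_towers if r + c == m]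
-- ===== Notes on version B (the rewrite author's own statement) =====
-- stated objective: simpler
-- what changed: Replaces the running-max loop with reset/append of the best-so-far list by a two-step aggregate-then-filter: compute the target sum max(sums+[0]) once, then a single comprehension keeps pairs with that sum.
import Mathlib
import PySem

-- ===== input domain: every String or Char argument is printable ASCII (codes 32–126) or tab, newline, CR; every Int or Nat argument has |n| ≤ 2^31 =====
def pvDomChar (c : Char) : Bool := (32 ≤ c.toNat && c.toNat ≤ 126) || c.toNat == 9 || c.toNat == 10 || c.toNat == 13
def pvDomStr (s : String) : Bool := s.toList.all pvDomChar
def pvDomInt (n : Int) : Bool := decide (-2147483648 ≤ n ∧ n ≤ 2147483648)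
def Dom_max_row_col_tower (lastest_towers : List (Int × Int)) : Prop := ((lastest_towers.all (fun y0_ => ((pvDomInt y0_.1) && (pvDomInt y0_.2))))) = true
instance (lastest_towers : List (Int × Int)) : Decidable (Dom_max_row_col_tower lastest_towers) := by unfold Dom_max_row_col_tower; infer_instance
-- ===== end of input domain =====

-- B replaces A's running-max loop (reset/append of the best-so-far list) by
-- aggregate-then-filter: compute m = max(sums+[0]) once, then one filtering pass. Objective: simpler.

-- ===== PORT A =====
-- the for-loop of A, state (max_tower, temp), one step per element in order
def pvLoopA : List (Int × Int) → Int → List (Int × Int) → List (Int × Int)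
  | [], _, temp => temp
  | (r, c) :: rest, maxTower, temp =>
    if maxTower < r + c then pvLoopA rest (r + c) [(r, c)]
    else if maxTower = r + c then pvLoopA rest maxTower (temp ++ [(r, c)])
    else pvLoopA rest maxTower temp

def max_row_col_tower (lastest_towers : List (Int × Int)) : List (Int × Int) :=
  pvLoopA lastest_towers 0 []

-- ===== PORT B =====
def max_row_col_tower_alt (lastest_towers : List (Int × Int)) : List (Int × Int) :=
  -- m = max([r + c for r, c in lastest_towers] + [0]); the none branch is unreachable
  -- since the list ends with the literal 0
  match PySem.List.max? (lastest_towers.map (fun p => p.1 + p.2) ++ [0]) (fun x => x) with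
  | some m => lastest_towers.filter (fun p => decide (p.1 + p.2 = m))
  | none => []

-- ===== PRECONDITION & SPEC =====
def Spec_max_row_col_tower (lastest_towers : List (Int × Int)) (out : List (Int × Int)) : Prop := out = max_row_col_tower_alt lastest_towers
instance (lastest_towers : List (Int × Int)) (out : List (Int × Int)) : Decidable (Spec_max_row_col_tower lastest_towers out) := by unfold Spec_max_row_col_tower; infer_instance

-- ===== CLAIM (what is proved, stated in full; the proofs are below) =====
def Claim_equal_max_row_col_tower : Prop := ∀ (lastest_towers : List (Int × Int)), Dom_max_row_col_tower lastest_towers → Spec_max_row_col_tower lastest_towers (max_row_col_tower lastest_towers)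

-- ===== LEMMAS AND PROOFS =====

-- running max of the sums, seeded with m
def pvM (m : Int) (xs : List (Int × Int)) : Int :=
  xs.foldl (fun a p => max a (p.1 + p.2)) m

theorem pvM_nil (m : Int) : pvM m [] = m := rfl

theorem pvM_cons (m : Int) (p : Int × Int) (xs : List (Int × Int)) :
    pvM m (p :: xs) = pvM (max m (p.1 + p.2)) xs := rfl

theorem le_pvM : ∀ (xs : List (Int × Int)) (m : Int), m ≤ pvM m xs := by
  intro xs
  induction xs with
  | nil => intro m; simp [pvM_nil]
  | cons p rest ih =>
    intro m
    calc m ≤ max m (p.1 + p.2) := le_max_left _ _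
    _ ≤ pvM (max m (p.1 + p.2)) rest := ih _
    _ = pvM m (p :: rest) := (pvM_cons m p rest).symm

theorem pvLoopA_eq : ∀ (xs : List (Int × Int)) (m : Int) (t : List (Int × Int)),
    pvLoopA xs m t =
      (if pvM m xs = m then t else []) ++
        xs.filter (fun p => decide (p.1 + p.2 = pvM m xs)) := by
  intro xs
  induction xs with
  | nil => intro m t; simp [pvLoopA, pvM_nil]
  | cons p rest ih =>
    intro m t
    obtain ⟨r, c⟩ := p
    by_cases h1 : m < r + c
    · have hV : r + c ≤ pvM (r + c) rest := le_pvM rest (r + c)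
      have hM : pvM m ((r, c) :: rest) = pvM (r + c) rest := by
        simp [pvM_cons, max_eq_right (le_of_lt h1)]
      simp only [pvLoopA, if_pos h1, ih, hM, List.filter_cons, decide_eq_true_eq]
      split_ifs
      all_goals first | (exfalso; omega) | simp
    · by_cases h2 : m = r + c
      · have hM : pvM m ((r, c) :: rest) = pvM m rest := by
          simp [pvM_cons, ← h2]
        simp only [pvLoopA, if_neg h1, if_pos h2, ih, hM, List.filter_cons, decide_eq_true_eq]
        split_ifs
        all_goals first | (exfalso; omega) | simp
      · have hlt : r + c < m := by omega
        have hM : pvM m ((r, c) :: rest) = pvM m rest := by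
          simp [pvM_cons, max_eq_left (le_of_lt hlt)]
        have hm : m ≤ pvM m rest := le_pvM rest m
        simp only [pvLoopA, if_neg h1, if_neg h2, ih, hM, List.filter_cons, decide_eq_true_eq]
        split_ifs
        all_goals first | (exfalso; omega) | rfl

-- pulling the seed out of the running max
theorem pvM_max : ∀ (xs : List (Int × Int)) (m a : Int),
    max (pvM m xs) a = pvM (max a m) xs := by
  intro xs
  induction xs with
  | nil => intro m a; simp [pvM_nil, max_comm]
  | cons p rest ih =>
    intro m a
    simp only [pvM_cons, ih]
    congr 1
    omega

-- B's computed maximum is the same value as A's running max seeded with 0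
theorem maxval_eq (xs : List (Int × Int)) :
    PySem.List.max? (xs.map (fun p => p.1 + p.2) ++ [0]) (fun x => x) = some (pvM 0 xs) := by
  cases xs with
  | nil => simp [PySem.List.max?_id_cons, pvM_nil]
  | cons p rest =>
    obtain ⟨r, c⟩ := p
    rw [List.map_cons, List.cons_append, PySem.List.max?_id_cons]
    have h1 : (rest.map (fun q : Int × Int => q.1 + q.2) ++ [0]).foldl max (r + c)
        = max (pvM (r + c) rest) 0 := by
      rw [List.foldl_append, List.foldl_map]; rfl
    rw [h1, pvM_max]
    exact congrArg some (pvM_cons 0 (r, c) rest).symm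

-- ===== VERDICT (by name: the statement is the Claim_ definition above) =====
theorem max_row_col_tower_spec : Claim_equal_max_row_col_tower := by
  intro xs _
  unfold Spec_max_row_col_tower max_row_col_tower max_row_col_tower_alt
  rw [pvLoopA_eq, maxval_eq]
  split_ifs <;> simp
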